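-- pv_equiv track=rewrite | github.com/Aryaman-Jha/ECA_184_Critical | ECA184_Critical_Phenomena_Paper/get_microjams.py | calc_total_runs_ones
-- ===== SOURCE A (Python) =====
-- def calc_total_runs_ones(arr):
--
--     total_length = 0
--     current_length = 0
--
--     for num in arr:
--         if num == 1:
--             current_length += 1
--         else:
--             if current_length > 1:  # Only consider runs longer than 1
--                 total_length += current_length
--             current_length = 0
--
--     # Add the last run if it exists
--     if current_length > 1:
--         total_length += current_length
--     if arr[0]*arr[-1] > 0 and arr[1] == 0 :
--         total_length += 1
--     if arr[0]*arr[-1] > 0 and arr[-2] == 0 :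
--         total_length += 1
--
--     return total_length
-- ===== SOURCE B (Python) =====
-- def calc_total_runs_ones(arr):
--     # group-scan: jump from run boundary to run boundary with two indices
--     total = 0
--     i, n = 0, len(arr)
--     while i < n:
--         if arr[i] == 1:
--             j = i
--             while j < n and arr[j] == 1:
--                 j += 1
--             if j - i > 1:
--                 total += j - i
--             i = j
--         else:
--             i += 1
--     if arr[0] * arr[-1] > 0:
--         total += (arr[1] == 0) + (arr[-2] == 0)
--     return total
-- ===== Notes on version B (the rewrite author's own statement) =====
-- stated objective: alternative
-- what changed: replaces A's element-by-element state machine (current_length/total_length accumulators) with a two-index group scan that jumps from run boundary to run boundary (an inner loop measures each maximal run of ones at once), and merges A's two trailing edge-adjustment ifs into one guarded sum of indicators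
import Mathlib
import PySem

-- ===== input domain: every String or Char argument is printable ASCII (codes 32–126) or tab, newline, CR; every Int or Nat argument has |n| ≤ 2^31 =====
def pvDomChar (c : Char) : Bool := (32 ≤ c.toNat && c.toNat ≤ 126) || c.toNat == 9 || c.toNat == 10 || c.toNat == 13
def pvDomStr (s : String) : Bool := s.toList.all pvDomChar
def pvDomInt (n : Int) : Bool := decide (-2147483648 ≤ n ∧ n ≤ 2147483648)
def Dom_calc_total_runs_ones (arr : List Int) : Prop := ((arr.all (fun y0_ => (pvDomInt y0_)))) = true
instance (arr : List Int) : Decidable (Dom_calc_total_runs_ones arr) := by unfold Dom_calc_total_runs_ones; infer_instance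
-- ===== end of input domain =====

-- B replaces A's per-element state machine by a two-index group scan over maximal runs (alternative decomposition, same cost); equivalence on the return value.

-- ===== PORT A =====
-- state = (total_length, current_length); the index accesses use getD 0 only because
-- Pre_ excludes the inputs on which Python's arr[0]/arr[-1]/arr[1]/arr[-2] would raise IndexError.
def calc_total_runs_ones (arr : List Int) : Int :=
  let s := arr.foldl (fun (s : Int × Int) num =>
      if num = 1 then (s.1, s.2 + 1)
      else ((if s.2 > 1 then s.1 + s.2 else s.1), 0)) (0, 0)
  let total := if s.2 > 1 then s.1 + s.2 else s.1
  let total := if (PySem.List.pyGet? arr 0).getD 0 * (PySem.List.pyGet? arr (-1)).getD 0 > 0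
                  ∧ (PySem.List.pyGet? arr 1).getD 0 = 0 then total + 1 else total
  let total := if (PySem.List.pyGet? arr 0).getD 0 * (PySem.List.pyGet? arr (-1)).getD 0 > 0
                  ∧ (PySem.List.pyGet? arr (-2)).getD 0 = 0 then total + 1 else total
  total

-- ===== PORT B =====
-- inner while loop = length of the maximal leading run of ones (j - i)
def pvRunLen : List Int → Nat
  | [] => 0
  | x :: r => if x = 1 then pvRunLen r + 1 else 0

-- outer while loop: skip non-ones one step at a time, jump over a whole run of ones at once
def pvScan : List Int → Int
  | [] => 0
  | x :: r =>
    if x = 1 then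
      let k : Nat := pvRunLen r + 1
      (if (k : Int) > 1 then (k : Int) else 0) + pvScan (r.drop (pvRunLen r))
    else pvScan r
termination_by l => l.length
decreasing_by
  · simp only [List.length_drop, List.length_cons]; omega
  · simp

-- the single guarded edge adjustment of Source B; getD 0 is safe for the same Pre_ reason as in A
def calc_total_runs_ones_alt (arr : List Int) : Int :=
  let total := pvScan arr
  if (PySem.List.pyGet? arr 0).getD 0 * (PySem.List.pyGet? arr (-1)).getD 0 > 0 then
    total + (if (PySem.List.pyGet? arr 1).getD 0 = 0 then 1 else 0)
          + (if (PySem.List.pyGet? arr (-2)).getD 0 = 0 then 1 else 0)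
  else total

-- ===== PRECONDITION & SPEC =====
-- Pre_ excludes exactly the inputs on which Python A raises IndexError: the empty list (arr[0])
-- and one-element lists [x] with x ≠ 0 (arr[1] after arr[0]*arr[-1] > 0).
def Pre_calc_total_runs_ones (arr : List Int) : Prop := 2 ≤ arr.length ∨ arr = [0]
instance (arr : List Int) : Decidable (Pre_calc_total_runs_ones arr) := by unfold Pre_calc_total_runs_ones; infer_instance
def pvWitness_calc_total_runs_ones : List Int := [1, 1, 0]

def Spec_calc_total_runs_ones (arr : List Int) (out : Int) : Prop := out = calc_total_runs_ones_alt arr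
instance (arr : List Int) (out : Int) : Decidable (Spec_calc_total_runs_ones arr out) := by unfold Spec_calc_total_runs_ones; infer_instance

-- ===== CLAIM (what is proved, stated in full; the proofs are below) =====
def Claim_equal_calc_total_runs_ones : Prop := ∀ (arr : List Int), Dom_calc_total_runs_ones arr → Pre_calc_total_runs_ones arr → Spec_calc_total_runs_ones arr (calc_total_runs_ones arr)

-- ===== LEMMAS AND PROOFS =====

-- recursive characterisation of A's state-machine core: ones contributed by runs > 1 in 1^c ++ arr
def pvH (c : Int) : List Int → Int
  | [] => if c > 1 then c else 0
  | x :: r => if x = 1 then pvH (c + 1) r else (if c > 1 then c else 0) + pvH 0 r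

theorem pvA_core (arr : List Int) : ∀ (t c : Int),
    (let s := arr.foldl (fun (s : Int × Int) num =>
        if num = 1 then (s.1, s.2 + 1)
        else ((if s.2 > 1 then s.1 + s.2 else s.1), 0)) (t, c)
     if s.2 > 1 then s.1 + s.2 else s.1) = t + pvH c arr := by
  induction arr with
  | nil => intro t c; simp [pvH]; split <;> ring
  | cons x r ih =>
    intro t c
    by_cases hx : x = 1
    · simpa [List.foldl, hx, pvH] using ih t (c + 1)
    · simp only [List.foldl, if_neg hx, pvH]
      rw [ih]
      split <;> ring

-- one unfolding step of B's scan, valid for any head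
theorem pvScan_step (r : List Int) :
    pvScan r = (if (pvRunLen r : Int) > 1 then (pvRunLen r : Int) else 0)
      + pvScan (r.drop (pvRunLen r)) := by
  cases r with
  | nil => simp [pvScan, pvRunLen]
  | cons x s =>
    by_cases hx : x = 1
    · rw [pvScan, if_pos hx]
      simp [pvRunLen, hx]
    · have h0 : pvRunLen (x :: s) = 0 := by simp [pvRunLen, hx]
      rw [h0]
      norm_num

theorem pvHScan : ∀ (arr : List Int) (c : Int), 0 ≤ c →
    pvH c arr = (if c + (pvRunLen arr : Int) > 1 then c + (pvRunLen arr : Int) else 0)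
      + pvScan (arr.drop (pvRunLen arr)) := by
  intro arr
  induction arr with
  | nil => intro c _; simp [pvH, pvRunLen, pvScan]
  | cons x r ih =>
    intro c hc
    by_cases hx : x = 1
    · rw [pvH, if_pos hx, ih (c + 1) (by omega)]
      simp only [pvRunLen, if_pos hx, List.drop_succ_cons]
      push_cast
      ring_nf
    · rw [pvH, if_neg hx, ih 0 (by omega)]
      simp only [zero_add]
      rw [← pvScan_step r]
      have h0 : pvRunLen (x :: r) = 0 := by simp [pvRunLen, hx]
      have hstep : pvScan (x :: r) = pvScan r := by rw [pvScan, if_neg hx]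
      simp [h0, hstep]

theorem pvH_eq_pvScan (arr : List Int) : pvH 0 arr = pvScan arr := by
  rw [pvHScan arr 0 le_rfl]
  simp only [zero_add]
  rw [← pvScan_step arr]

-- ===== VERDICT (by name: the statement is the Claim_ definition above) =====
theorem calc_total_runs_ones_spec : Claim_equal_calc_total_runs_ones := by
  intro arr _ _
  unfold Spec_calc_total_runs_ones
  have hA := pvA_core arr 0 0
  norm_num at hA
  simp only [calc_total_runs_ones, calc_total_runs_ones_alt, hA, pvH_eq_pvScan]
  by_cases hp : (PySem.List.pyGet? arr 0).getD 0 * (PySem.List.pyGet? arr (-1)).getD 0 > 0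
  · simp only [hp, true_and, if_true]
    split_ifs <;> ring
  · simp [hp]
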